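-- pv_equiv track=rewrite | github.com/jonesoliver981/word_to_excel_tool | excel_sheet_split_project/paragraph.py | split_with_first_occurrence
-- ===== SOURCE A (Python) =====
-- def split_with_first_occurrence(string, delimiters):
--     result = [string]
--     for delimiter in delimiters:
--         new_result = []
--         for item in result:
--             parts = item.split(delimiter, 1)
--             new_result.extend(parts)
--         result = new_result
--     return [res for res in result if res != '']
-- ===== SOURCE B (Python) =====
-- def split_with_first_occurrence(string, delimiters):
--     delimiters = list(delimiters)
--     n = len(delimiters)
--     out = []
--     stack = [(string, 0)]
--     while stack:
--         s, i = stack.pop()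
--         while i < n:
--             parts = s.split(delimiters[i], 1)
--             i += 1
--             if len(parts) == 2:
--                 stack.append((parts[1], i))
--             s = parts[0]
--         if s != '':
--             out.append(s)
--     return out
-- ===== Notes on version B (the rewrite author's own statement) =====
-- stated objective: alternative
-- what changed: Replaces the per-delimiter passes that repeatedly rebuild the whole list of pieces (plus a final filter pass) with a single explicit-stack depth-first traversal that splits each substring independently on its remaining delimiters and emits non-empty leaves directly.
import Mathlib
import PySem

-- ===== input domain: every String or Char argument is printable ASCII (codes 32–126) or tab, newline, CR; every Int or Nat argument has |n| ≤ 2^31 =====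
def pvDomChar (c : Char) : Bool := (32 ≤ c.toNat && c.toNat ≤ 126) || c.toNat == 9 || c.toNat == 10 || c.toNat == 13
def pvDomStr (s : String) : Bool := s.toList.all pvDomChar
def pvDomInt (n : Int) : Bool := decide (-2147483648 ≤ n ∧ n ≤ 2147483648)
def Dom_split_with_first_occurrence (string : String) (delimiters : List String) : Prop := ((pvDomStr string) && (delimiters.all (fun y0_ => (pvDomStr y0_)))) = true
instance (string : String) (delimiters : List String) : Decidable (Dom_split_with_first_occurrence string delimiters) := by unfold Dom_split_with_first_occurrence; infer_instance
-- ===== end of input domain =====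

-- ===== PORT A =====
-- B replaces A's per-delimiter passes over a growing list (plus a final filter pass) with one
-- explicit-stack depth-first descent emitting non-empty leaves directly (alternative decomposition).
def split_with_first_occurrence (string : String) (delimiters : List String) : List String :=
  let result :=
    delimiters.foldl (fun result delimiter =>
      result.foldl (fun new_result item =>
        -- item.split(delimiter, 1); splitMax? is none only for delimiter = "", excluded by Pre_
        new_result ++ ((PySem.Str.splitMax? item delimiter 1).getD [item])) []) [string]
  result.filter (fun res => res ≠ "")

-- ===== PORT B =====
-- the inner while-loop of Source B: descend the leftmost piece through the remaining
-- delimiters, pushing each split-off right piece; returns (final s, final stack).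
-- k is the loop fuel n - i (the while condition i < n fails exactly when the fuel is spent);
-- the [] branch is unreachable (s.split(d, 1) never returns []) and only totalises the match.
def pvInner (delims : List String) : Nat → String → Nat → List (String × Nat) →
    String × List (String × Nat)
  | 0, s, _, stack => (s, stack)
  | k + 1, s, i, stack =>
    if h : i < delims.length then
      match (PySem.Str.splitMax? s delims[i] 1).getD [s] with
      | [a] => pvInner delims k a (i + 1) stack
      | a :: b :: _ => pvInner delims k a (i + 1) ((b, i + 1) :: stack)
      | [] => (s, stack)
    else (s, stack)

-- termination helper for the outer loop: the stack measure pvInner leaves behind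
def pvM (n : Nat) (st : List (String × Nat)) : Nat := (st.map (fun e => 3 ^ (n - e.2))).sum

theorem pv_inner_M (delims : List String) : ∀ (k : Nat) (s : String) (i : Nat)
    (st : List (String × Nat)),
    pvM delims.length ((pvInner delims k s i st).2) < pvM delims.length st
      + 3 ^ (delims.length - i) := by
  intro k
  induction k with
  | zero =>
    intro s i st
    have h3 : (0:Nat) < 3 ^ (delims.length - i) := Nat.pow_pos (by norm_num)
    simp only [pvInner]
    omega
  | succ k ih =>
    intro s i st
    rw [pvInner]
    split
    · next h =>
      have h3 : (0:Nat) < 3 ^ (delims.length - (i + 1)) := Nat.pow_pos (by norm_num)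
      have hpow : delims.length - i = (delims.length - (i + 1)) + 1 := by omega
      split
      · next a _ =>
        calc pvM delims.length ((pvInner delims k a (i + 1) st).2)
            < pvM delims.length st + 3 ^ (delims.length - (i + 1)) := ih a (i + 1) st
          _ ≤ pvM delims.length st + 3 ^ (delims.length - i) := by
              rw [hpow, pow_succ]; omega
      · next a b tail _ =>
        have hM : pvM delims.length ((b, i + 1) :: st)
            = 3 ^ (delims.length - (i + 1)) + pvM delims.length st := by
          simp [pvM]
        calc pvM delims.length ((pvInner delims k a (i + 1) ((b, i + 1) :: st)).2)
            < pvM delims.length ((b, i + 1) :: st) + 3 ^ (delims.length - (i + 1)) :=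
              ih a (i + 1) ((b, i + 1) :: st)
          _ = pvM delims.length st + 2 * 3 ^ (delims.length - (i + 1)) := by rw [hM]; ring
          _ < pvM delims.length st + 3 ^ (delims.length - i) := by
              rw [hpow, pow_succ]; omega
      · next _ =>
        have h3' : (0:Nat) < 3 ^ (delims.length - i) := Nat.pow_pos (by norm_num)
        simp only []
        omega
    · next h =>
      have h3 : (0:Nat) < 3 ^ (delims.length - i) := Nat.pow_pos (by norm_num)
      simp only []
      omega

-- the outer while-loop of Source B: pop, descend, emit the non-empty leaf
def pvOuter (delims : List String) (stack : List (String × Nat)) (out : List String) :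
    List String :=
  match stack with
  | [] => out
  | (s, i) :: rest =>
    let r := pvInner delims (delims.length - i) s i rest
    pvOuter delims r.2 (if r.1 ≠ "" then out ++ [r.1] else out)
termination_by pvM delims.length stack
decreasing_by
  have := pv_inner_M delims (delims.length - i) s i rest
  simp only [pvM, List.map_cons, List.sum_cons] at *
  omega

def split_with_first_occurrence_alt (string : String) (delimiters : List String) : List String :=
  pvOuter delimiters [(string, 0)] []

-- ===== PRECONDITION & SPEC =====
-- Pre_ excludes an empty-string delimiter, on which Python's str.split raises ValueError (both A and B raise there).
def Pre_split_with_first_occurrence (string : String) (delimiters : List String) : Prop :=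
  "" ∉ delimiters
instance (string : String) (delimiters : List String) : Decidable (Pre_split_with_first_occurrence string delimiters) := by unfold Pre_split_with_first_occurrence; infer_instance
def pvWitness_split_with_first_occurrence : String × List String := ("a,b.c", [",", "."])

def Spec_split_with_first_occurrence (string : String) (delimiters : List String) (out : List String) : Prop := out = split_with_first_occurrence_alt string delimiters
instance (string : String) (delimiters : List String) (out : List String) : Decidable (Spec_split_with_first_occurrence string delimiters out) := by unfold Spec_split_with_first_occurrence; infer_instance

-- ===== CLAIM (what is proved, stated in full; the proofs are below) =====
def Claim_equal_split_with_first_occurrence : Prop := ∀ (string : String) (delimiters : List String), Dom_split_with_first_occurrence string delimiters → Pre_split_with_first_occurrence string delimiters → Spec_split_with_first_occurrence string delimiters (split_with_first_occurrence string delimiters)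

-- ===== LEMMAS AND PROOFS =====

-- s.split(d, 1) has at most 2 pieces and is never empty
theorem pv_go_len (sep : List Char) (fuel : Nat) : ∀ (m : Nat) (l cur : List Char)
    (acc : List (List Char)),
    (PySem.Chars.splitOnMax.go sep fuel m l cur acc).length ≤ acc.length + m + 1 := by
  induction fuel with
  | zero => intro m l cur acc; simp [PySem.Chars.splitOnMax.go]
  | succ fuel ih =>
    intro m l cur acc
    match l with
    | [] => simp [PySem.Chars.splitOnMax.go]
    | c :: rest =>
      rw [PySem.Chars.splitOnMax.go]
      split_ifs with hm hp
      · simp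
      · have := ih (m - 1) (List.drop sep.length (c :: rest)) [] (cur.reverse :: acc)
        simp at this ⊢
        omega
      · have := ih m rest (c :: cur) acc
        omega

theorem pv_parts_len (s d : String) : ((PySem.Str.splitMax? s d 1).getD [s]).length ≤ 2 := by
  simp only [PySem.Str.splitMax?, PySem.Chars.splitMax?]
  split_ifs with h
  · simp
  · simp only [Option.map_some, Option.getD_some, List.length_map, PySem.Chars.splitOnMax]
    norm_num
    have := pv_go_len d.toList (s.toList.length + 1) 1 s.toList [] []
    simpa using this

theorem pv_go_ne_nil (sep : List Char) (fuel : Nat) : ∀ (m : Nat) (l cur : List Char)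
    (acc : List (List Char)),
    1 ≤ (PySem.Chars.splitOnMax.go sep fuel m l cur acc).length := by
  induction fuel with
  | zero => intro m l cur acc; simp [PySem.Chars.splitOnMax.go]
  | succ fuel ih =>
    intro m l cur acc
    match l with
    | [] => simp [PySem.Chars.splitOnMax.go]
    | c :: rest =>
      rw [PySem.Chars.splitOnMax.go]
      split_ifs with hm hp
      · simp
      · exact ih (m - 1) (List.drop sep.length (c :: rest)) [] (cur.reverse :: acc)
      · exact ih m rest (c :: cur) acc

theorem pv_parts_ne_nil (s d : String) : (PySem.Str.splitMax? s d 1).getD [s] ≠ [] := by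
  simp only [PySem.Str.splitMax?, PySem.Chars.splitMax?]
  split_ifs with h
  · simp
  · simp only [Option.map_some, Option.getD_some, ne_eq, List.map_eq_nil_iff,
      PySem.Chars.splitOnMax]
    norm_num
    intro hc
    have := pv_go_ne_nil d.toList (s.length + 1) 1 s.toList [] []
    rw [hc] at this
    simp at this

-- proof-only recursive characterisation of the DFS: the pieces a substring yields
def pvGo_split (s : String) (ds : List String) : List String :=
  match ds with
  | [] => [s]
  | d :: rest => ((PySem.Str.splitMax? s d 1).getD [s]).flatMap (fun p => pvGo_split p rest)

-- A's inner pass over one delimiter is a flatMap of the one-step split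
theorem pv_inner_pass (items : List String) (d : String) :
    items.foldl (fun new_result item =>
        new_result ++ ((PySem.Str.splitMax? item d 1).getD [item])) []
      = items.flatMap (fun item => (PySem.Str.splitMax? item d 1).getD [item]) := by
  simpa using PySem.List.foldl_append_eq_flatMap
    (l := items) (acc := []) (g := fun item => (PySem.Str.splitMax? item d 1).getD [item])

-- The whole foldl of A equals flatMapping the DFS characterisation over the pieces
theorem pv_fold_eq_go (ds : List String) (items : List String) :
    ds.foldl (fun result delimiter =>
        result.foldl (fun new_result item =>
          new_result ++ ((PySem.Str.splitMax? item delimiter 1).getD [item])) []) items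
      = items.flatMap (fun s => pvGo_split s ds) := by
  induction ds generalizing items with
  | nil => simp [pvGo_split]
  | cons d rest ih =>
    simp only [List.foldl_cons]
    rw [pv_inner_pass, ih, List.flatMap_assoc]
    simp [pvGo_split]

-- what the descent contributes: its leaf plus the new stack carry exactly the
-- filtered DFS pieces of (s, i) plus the old stack's contribution
theorem pv_inner_eq (delims : List String) : ∀ (k : Nat) (s : String) (i : Nat)
    (st : List (String × Nat)), delims.length ≤ k + i →
    ([(pvInner delims k s i st).1].filter (fun r => r ≠ ""))
        ++ ((pvInner delims k s i st).2).flatMap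
            (fun e => (pvGo_split e.1 (delims.drop e.2)).filter (fun r => r ≠ ""))
      = (pvGo_split s (delims.drop i)).filter (fun r => r ≠ "")
        ++ st.flatMap
            (fun e => (pvGo_split e.1 (delims.drop e.2)).filter (fun r => r ≠ "")) := by
  intro k
  induction k with
  | zero =>
    intro s i st hk
    have hd : delims.drop i = [] := List.drop_eq_nil_of_le (by omega)
    simp [pvInner, hd, pvGo_split]
  | succ k ih =>
    intro s i st hk
    rw [pvInner]
    split
    · next h =>
      have hd : delims.drop i = delims[i] :: delims.drop (i + 1) :=
        List.drop_eq_getElem_cons h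
      rcases hp : (PySem.Str.splitMax? s delims[i] 1).getD [s] with _ | ⟨a, _ | ⟨b, tail⟩⟩
      · exact absurd hp (pv_parts_ne_nil s delims[i])
      · dsimp only
        rw [ih a (i + 1) st (by omega)]
        rw [hd]
        simp only [pvGo_split, hp]
        simp
      · have htail : tail = [] := by
          have hlen := pv_parts_len s delims[i]
          rw [hp] at hlen
          simp at hlen
          simpa using hlen
        subst htail
        dsimp only
        rw [ih a (i + 1) ((b, i + 1) :: st) (by omega)]
        rw [hd]
        simp only [pvGo_split, hp]
        simp [List.filter_append]
    · next h =>
      have hd : delims.drop i = [] := List.drop_eq_nil_of_le (by omega)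
      rw [hd]
      simp [pvGo_split]

-- the outer loop drains the stack, appending each entry's filtered pieces
theorem pv_outer_eq (delims : List String) : ∀ (stack : List (String × Nat))
    (out : List String),
    pvOuter delims stack out
      = out ++ stack.flatMap
          (fun e => (pvGo_split e.1 (delims.drop e.2)).filter (fun r => r ≠ "")) := by
  intro stack out
  induction stack, out using pvOuter.induct delims with
  | case1 out => simp [pvOuter]
  | case2 out s i rest r ih =>
    have hr : r = pvInner delims (delims.length - i) s i rest := rfl
    rw [pvOuter, ← hr]
    simp only [dite_eq_ite] at ih
    rw [ih]
    have h := pv_inner_eq delims (delims.length - i) s i rest (by omega)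
    rw [← hr] at h
    have hout : (if r.1 ≠ "" then out ++ [r.1] else out)
        = out ++ ([r.1].filter (fun x => x ≠ "")) := by
      split_ifs with hs <;> simp [hs]
    rw [hout, List.append_assoc, h]
    simp

-- ===== VERDICT (by name: the statement is the Claim_ definition above) =====
theorem split_with_first_occurrence_spec : Claim_equal_split_with_first_occurrence := by
  intro s ds _ _
  show split_with_first_occurrence s ds = split_with_first_occurrence_alt s ds
  unfold split_with_first_occurrence split_with_first_occurrence_alt
  rw [pv_fold_eq_go, pv_outer_eq ds [(s, 0)] []]
  simp
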